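-- pv_equiv track=rewrite | github.com/basnijholt/unidep | unidep/_pixi.py | _canonicalize_version_spec
-- ===== SOURCE A (Python) =====
-- def _canonicalize_version_spec(version_spec: str) -> str:
--     """Normalize comma-separated version constraints to a stable order."""
--     if "," not in version_spec:
--         return version_spec
--
--     operator_order = {
--         "==": 0,
--         "===": 0,
--         "~=": 1,
--         ">=": 2,
--         ">": 3,
--         "<=": 4,
--         "<": 5,
--         "!=": 6,
--         "=": 7,
--     }
--
--     def _constraint_key(constraint: str) -> tuple[int, str]:
--         token = constraint.strip()
--         op = next(
--             (
--                 candidate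
--                 for candidate in ("===", "==", "~=", ">=", "<=", "!=", ">", "<", "=")
--                 if token.startswith(candidate)
--             ),
--             "",
--         )
--         return (operator_order.get(op, 8), token)
--
--     parts = [part.strip() for part in version_spec.split(",") if part.strip()]
--     return ",".join(sorted(parts, key=_constraint_key))
-- ===== SOURCE B (Python) =====
-- def _priority(token: str) -> int:
--     """Priority bucket of a constraint token by its leading operator characters."""
--     head = token[:1]
--     has_eq = token[1:2] == "="
--     if head == "=":
--         return 0 if has_eq else 7
--     if head == "~":
--         return 1 if has_eq else 8
--     if head == ">":
--         return 2 if has_eq else 3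
--     if head == "<":
--         return 4 if has_eq else 5
--     if head == "!":
--         return 6 if has_eq else 8
--     return 8
--
--
-- def _canonicalize_version_spec(version_spec: str) -> str:
--     """Normalize comma-separated version constraints to a stable order."""
--     if "," not in version_spec:
--         return version_spec
--     parts = [part.strip() for part in version_spec.split(",") if part.strip()]
--     out = []
--     for prio in range(9):
--         out.extend(sorted(t for t in parts if _priority(t) == prio))
--     return ",".join(out)
-- ===== Notes on version B (the rewrite author's own statement) =====
-- stated objective: alternative
-- what changed: Replaces the composite-key comparison sort (sorted with key=(operator-priority, token)) by a distribution into 9 priority buckets selected by direct inspection of the token's first two characters, emitting each bucket's plainly-sorted tokens in priority order.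
import Mathlib
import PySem

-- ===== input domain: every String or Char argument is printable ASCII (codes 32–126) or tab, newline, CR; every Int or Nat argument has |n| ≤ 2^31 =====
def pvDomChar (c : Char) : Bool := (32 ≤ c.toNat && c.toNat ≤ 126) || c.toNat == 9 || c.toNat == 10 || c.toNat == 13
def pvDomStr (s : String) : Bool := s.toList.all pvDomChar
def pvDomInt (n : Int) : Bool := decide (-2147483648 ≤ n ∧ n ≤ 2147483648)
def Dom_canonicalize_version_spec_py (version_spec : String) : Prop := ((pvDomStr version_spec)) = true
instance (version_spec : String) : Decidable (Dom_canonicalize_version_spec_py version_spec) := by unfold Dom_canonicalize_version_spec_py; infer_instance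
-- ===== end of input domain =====

-- B replaces A's composite-key comparison sort by a distribution into 9 operator-priority
-- buckets (priority read off the token's first two characters), each bucket plainly sorted;
-- objective: alternative (same cost, different algorithm).

-- ===== PORT A =====
-- the candidate operator prefixes, in A's matching order
def pvCandidates : List String := ["===", "==", "~=", ">=", "<=", "!=", ">", "<", "="]

-- the operator_order dict literal
def pvOperatorOrder : PySem.Dict String Int :=
  PySem.Dict.ofList
    [("==", 0), ("===", 0), ("~=", 1), (">=", 2), (">", 3), ("<=", 4), ("<", 5), ("!=", 6), ("=", 7)]

-- _constraint_key's first component: operator_order.get(op, 8)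
def pvConstraintKey1 (constraint : String) : Int :=
  let token := PySem.Str.strip constraint
  let op := (pvCandidates.find? (fun cand => PySem.Str.startswith token cand)).getD ""
  pvOperatorOrder.getD op 8

-- _constraint_key's second component: the stripped token
def pvConstraintKey2 (constraint : String) : String := PySem.Str.strip constraint

def canonicalize_version_spec_py (version_spec : String) : String :=
  if !PySem.Str.isIn "," version_spec then version_spec
  else
    -- version_spec.split(","): "," ≠ "", so split? is always `some`
    let parts := (((PySem.Str.split? version_spec ",").getD []).map
        (fun p => PySem.Str.strip p)).filter (fun p => p != "")
    PySem.Str.join "," (PySem.List.sorted2 parts pvConstraintKey1 pvConstraintKey2 false)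

-- ===== PORT B =====
-- _priority: bucket index from the first two characters (token[:1], token[1:2])
def pvPriorityB (token : String) : Int :=
  let head := PySem.Str.slice token none (some 1)
  let hasEq := PySem.Str.slice token (some 1) (some 2) = "="
  if head = "=" then (if hasEq then 0 else 7)
  else if head = "~" then (if hasEq then 1 else 8)
  else if head = ">" then (if hasEq then 2 else 3)
  else if head = "<" then (if hasEq then 4 else 5)
  else if head = "!" then (if hasEq then 6 else 8)
  else 8

def canonicalize_version_spec_py_alt (version_spec : String) : String :=
  if !PySem.Str.isIn "," version_spec then version_spec
  else
    let parts := (((PySem.Str.split? version_spec ",").getD []).map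
        (fun p => PySem.Str.strip p)).filter (fun p => p != "")
    -- for prio in range(9): out.extend(sorted(t for t in parts if _priority(t) == prio))
    let out := (PySem.List.pyRange 0 9 1).foldl
      (fun acc p =>
        acc ++ PySem.List.sorted (parts.filter (fun t => pvPriorityB t == p)) (fun t => t) false)
      []
    PySem.Str.join "," out

-- ===== PRECONDITION & SPEC =====
def Spec_canonicalize_version_spec_py (version_spec : String) (out : String) : Prop := out = canonicalize_version_spec_py_alt version_spec
instance (version_spec : String) (out : String) : Decidable (Spec_canonicalize_version_spec_py version_spec out) := by unfold Spec_canonicalize_version_spec_py; infer_instance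

-- ===== CLAIM (what is proved, stated in full; the proofs are below) =====
def Claim_equal_canonicalize_version_spec_py : Prop := ∀ (version_spec : String), Dom_canonicalize_version_spec_py version_spec → Spec_canonicalize_version_spec_py version_spec (canonicalize_version_spec_py version_spec)

-- ===== LEMMAS AND PROOFS =====

-- insertBy unfolding on a cons
theorem pv_insertBy_cons (b : String → String → Bool) (x y : String) (t : List String) :
    PySem.List.insertBy b x (y :: t) = if b x y then x :: y :: t else y :: PySem.List.insertBy b x t := by
  simp [PySem.List.insertBy]

-- skipping a block on which the insertion test is false
theorem pv_insertBy_append_false (b : String → String → Bool) (x : String) (l1 l2 : List String)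
    (h : ∀ y ∈ l1, b x y = false) :
    PySem.List.insertBy b x (l1 ++ l2) = l1 ++ PySem.List.insertBy b x l2 := by
  induction l1 with
  | nil => simp
  | cons y ys ih =>
      have hy := h y (by simp)
      simp only [List.cons_append, pv_insertBy_cons, hy, Bool.false_eq_true, if_false]
      rw [ih (fun z hz => h z (by simp [hz]))]

-- inserting strictly before a tail block, with the test agreeing with b2 on the head block
theorem pv_insertBy_switch (b b2 : String → String → Bool) (x : String) (l1 l2 : List String)
    (h1 : ∀ y ∈ l1, b x y = b2 x y) (h2 : ∀ z ∈ l2, b x z = true) :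
    PySem.List.insertBy b x (l1 ++ l2) = PySem.List.insertBy b2 x l1 ++ l2 := by
  induction l1 with
  | nil =>
      cases l2 with
      | nil => simp [PySem.List.insertBy]
      | cons z zs =>
          have hz := h2 z (by simp)
          simp [pv_insertBy_cons, hz, PySem.List.insertBy]
  | cons y ys ih =>
      have hy := h1 y (by simp)
      by_cases hb : b2 x y
      · simp [pv_insertBy_cons, hy, hb]
      · simp only [List.cons_append, pv_insertBy_cons, hy, hb, Bool.false_eq_true, if_false]
        rw [ih (fun z hz => h1 z (by simp [hz]))]

-- the composite before-function of A's sort, generic in the priority key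
def pvBA (k : String → Int) : String → String → Bool :=
  fun a b => decide (k a < k b) || (!decide (k b < k a) && decide (a < b))

def pvBS : String → String → Bool := fun a b => decide (a < b)

-- inserting one element into a priority-bucketed concatenation hits exactly its own bucket
theorem pv_insert_flat (k : String → Int) (x : String) (ps : List Int) (S : Int → List String)
    (hmem : k x ∈ ps) (hp : ps.Pairwise (· < ·))
    (hS : ∀ p ∈ ps, ∀ y ∈ S p, k y = p) :
    PySem.List.insertBy (pvBA k) x (ps.flatMap S)
      = ps.flatMap (fun p => if p = k x then PySem.List.insertBy pvBS x (S p) else S p) := by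
  induction ps with
  | nil => simp at hmem
  | cons p rest ih =>
      simp only [List.flatMap_cons]
      by_cases hpk : p = k x
      · rw [pv_insertBy_switch (pvBA k) pvBS x (S p) (rest.flatMap S)
            (fun y hy => by
              have hky := hS p (by simp) y hy
              simp [pvBA, pvBS, hky, hpk])
            (fun z hz => by
              rcases List.mem_flatMap.mp hz with ⟨q, hq, hzq⟩
              have hkz := hS q (by simp [hq]) z hzq
              have hlt : p < q := (List.pairwise_cons.mp hp).1 q hq
              rw [hpk] at hlt
              simp [pvBA, hkz, hlt])]
        rw [if_pos hpk]
        congr 1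
        apply List.flatMap_congr
        intro q hq
        have hlt : p < q := (List.pairwise_cons.mp hp).1 q hq
        rw [hpk] at hlt
        rw [if_neg (by omega)]
      · have hmem' : k x ∈ rest := by
          rcases List.mem_cons.mp hmem with h | h
          · exact absurd h.symm hpk
          · exact h
        have hlt : p < k x := (List.pairwise_cons.mp hp).1 _ hmem'
        rw [pv_insertBy_append_false (pvBA k) x (S p) (rest.flatMap S)
            (fun y hy => by
              have hky := hS p (by simp) y hy
              simp [pvBA, hky]
              omega)]
        rw [if_neg hpk]
        congr 1
        exact ih hmem' (List.pairwise_cons.mp hp).2 (fun q hq => hS q (by simp [hq]))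

-- the main bucket-sort characterisation of the stable insertion sort with composite key
theorem pv_bucket_main (k : String → Int) (hk : ∀ t, 0 ≤ k t ∧ k t < 9) (xs : List String) :
    xs.foldl (fun acc x => PySem.List.insertBy (pvBA k) x acc) []
      = ([0, 1, 2, 3, 4, 5, 6, 7, 8] : List Int).flatMap
          (fun p => PySem.List.sorted (xs.filter (fun t => k t == p)) (fun t => t) false) := by
  induction xs using List.reverseRecOn with
  | nil => simp [PySem.List.sorted]
  | append_singleton ys x ih =>
      rw [List.foldl_append, List.foldl_cons, List.foldl_nil, ih]
      rw [pv_insert_flat k x _ _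
          (by have := hk x; simp only [List.mem_cons, List.not_mem_nil, or_false]; omega)
          (by decide)
          (fun p _ y hy => by
            have := (List.mem_filter.mp ((PySem.List.mem_sorted _ _ _ _).mp hy)).2
            simpa using this)]
      apply List.flatMap_congr
      intro p hp
      rw [List.filter_append]
      by_cases hpx : p = k x
      · rw [if_pos hpx]
        have : (List.filter (fun t => k t == p) [x]) = [x] := by simp [hpx]
        rw [this, PySem.List.sorted_eq_foldl_insertBy, PySem.List.sorted_eq_foldl_insertBy,
          List.foldl_append, List.foldl_cons, List.foldl_nil]
        rfl
      · rw [if_neg hpx]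
        have : (List.filter (fun t => k t == p) [x]) = [] := by
          simp [Ne.symm hpx]
        rw [this, List.append_nil]

-- strip is idempotent (needed: A's key strips the already-stripped parts again)
theorem pv_dropWhile_prefix (p : Char → Bool) (l t : List Char) (hpre : l <+: t)
    (ht : List.dropWhile p t = t) : List.dropWhile p l = l := by
  cases l with
  | nil => simp
  | cons c l' =>
      rcases hpre with ⟨r, rfl⟩
      rw [List.cons_append] at ht
      by_cases hc : p c
      · exfalso
        rw [List.dropWhile_cons, if_pos hc] at ht
        have h1 := List.length_dropWhile_le p (l' ++ r)
        rw [ht] at h1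
        simp at h1
      · rw [List.dropWhile_cons, if_neg hc]

theorem pv_dropWhile_idem (p : Char → Bool) (l : List Char) :
    List.dropWhile p (List.dropWhile p l) = List.dropWhile p l := by
  induction l with
  | nil => simp
  | cons c t ih =>
      by_cases hc : p c
      · simp [hc, ih]
      · simp [hc]

theorem pv_rstrip_prefix (l : List Char) : PySem.Chars.rstrip l <+: l := by
  have h : List.dropWhile PySem.Chars.isspace l.reverse <:+ l.reverse :=
    List.dropWhile_suffix _
  have h2 := List.reverse_prefix.mpr h
  simpa [PySem.Chars.rstrip] using h2

theorem pv_chars_strip_idem (l : List Char) :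
    PySem.Chars.strip (PySem.Chars.strip l) = PySem.Chars.strip l := by
  unfold PySem.Chars.strip
  have h1 : PySem.Chars.lstrip (PySem.Chars.rstrip (PySem.Chars.lstrip l))
      = PySem.Chars.rstrip (PySem.Chars.lstrip l) := by
    unfold PySem.Chars.lstrip
    exact pv_dropWhile_prefix _ _ _ (pv_rstrip_prefix _) (pv_dropWhile_idem _ l)
  rw [h1]
  unfold PySem.Chars.rstrip
  rw [List.reverse_reverse]
  rw [pv_dropWhile_idem]

theorem pv_strip_idem (s : String) : PySem.Str.strip (PySem.Str.strip s) = PySem.Str.strip s := by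
  rw [← String.toList_inj]
  simp [PySem.Str.strip]
  exact pv_chars_strip_idem s.toList

-- the two priority keys agree on every string (A's, after stripping, only looks at the head)
theorem pv_slice01 (l : List Char) : PySem.List.slice l none (some 1) = l.take 1 := by
  rw [PySem.List.slice_to l (by norm_num : (0:Int) ≤ 1)]; norm_num

theorem pv_slice12 (l : List Char) : PySem.List.slice l (some 1) (some 2) = (l.drop 1).take 1 := by
  rw [show ((1:Int)) = ((1:Nat):Int) by norm_num, show ((2:Int)) = ((2:Nat):Int) by norm_num,
    PySem.List.slice_natCast l 1 2]

theorem pv_ofList_eq_lit (X : List Char) (s : String) : (String.ofList X = s) ↔ X = s.toList := by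
  rw [← String.toList_inj, String.toList_ofList]

theorem pv_neqb {c d : Char} (h : ¬ c = d) : (d == c) = false :=
  beq_eq_false_iff_ne.mpr (Ne.symm h)

theorem pv_key_eq_raw (t : String) :
    pvOperatorOrder.getD
        ((pvCandidates.find? (fun cand => PySem.Str.startswith t cand)).getD "") 8
      = pvPriorityB t := by
  simp only [pvPriorityB, PySem.Str.slice, PySem.Str.startswith, pvCandidates,
    PySem.Chars.slice_eq_listSlice, PySem.Chars.startswith, pv_slice01, pv_slice12,
    pv_ofList_eq_lit]
  rcases hl : t.toList with _ | ⟨c, tl⟩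
  · decide
  · rcases tl with _ | ⟨d, rest⟩
    · by_cases hc : c = '='
      · subst hc; decide
      · by_cases hc2 : c = '~'
        · subst hc2; decide
        · by_cases hc3 : c = '>'
          · subst hc3; decide
          · by_cases hc4 : c = '<'
            · subst hc4; decide
            · by_cases hc5 : c = '!'
              · subst hc5; decide
              · simp [List.find?, List.isPrefixOf, hc, hc2, hc3, hc4, hc5,
                  pv_neqb hc, pv_neqb hc2, pv_neqb hc3, pv_neqb hc4, pv_neqb hc5]
                decide
    · by_cases hc : c = '='
      · subst hc
        by_cases hd : d = '='
        · subst hd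
          by_cases hr : List.isPrefixOf ['='] rest
          · simp [List.find?, List.isPrefixOf, hr]
            decide
          · simp [List.find?, List.isPrefixOf, hr]
            decide
        · simp [List.find?, List.isPrefixOf, hd, pv_neqb hd]
          decide
      · by_cases hc2 : c = '~'
        · subst hc2
          by_cases hd : d = '='
          · subst hd; simp [List.find?, List.isPrefixOf]; decide
          · simp [List.find?, List.isPrefixOf, hd, pv_neqb hd]; decide
        · by_cases hc3 : c = '>'
          · subst hc3
            by_cases hd : d = '='
            · subst hd; simp [List.find?, List.isPrefixOf]; decide
            · simp [List.find?, List.isPrefixOf, hd, pv_neqb hd]; decide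
          · by_cases hc4 : c = '<'
            · subst hc4
              by_cases hd : d = '='
              · subst hd; simp [List.find?, List.isPrefixOf]; decide
              · simp [List.find?, List.isPrefixOf, hd, pv_neqb hd]; decide
            · by_cases hc5 : c = '!'
              · subst hc5
                by_cases hd : d = '='
                · subst hd; simp [List.find?, List.isPrefixOf]; decide
                · simp [List.find?, List.isPrefixOf, hd, pv_neqb hd]; decide
              · simp [List.find?, List.isPrefixOf, hc, hc2, hc3, hc4, hc5,
                  pv_neqb hc, pv_neqb hc2, pv_neqb hc3, pv_neqb hc4, pv_neqb hc5]
                decide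

theorem pv_key_eq (t : String) (h : PySem.Str.strip t = t) :
    pvConstraintKey1 t = pvPriorityB t := by
  unfold pvConstraintKey1
  rw [h]
  exact pv_key_eq_raw t

theorem pv_priority_bounds (t : String) : 0 ≤ pvPriorityB t ∧ pvPriorityB t < 9 := by
  simp only [pvPriorityB]
  split_ifs <;> omega

-- congruence of the insertBy fold in its before-function, on members
theorem pv_foldl_insertBy_congr (b b' : String → String → Bool) (xs acc : List String)
    (h : ∀ x ∈ xs, ∀ y, (y ∈ acc ∨ y ∈ xs) → b x y = b' x y) :
    xs.foldl (fun a x => PySem.List.insertBy b x a) acc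
      = xs.foldl (fun a x => PySem.List.insertBy b' x a) acc := by
  induction xs generalizing acc with
  | nil => rfl
  | cons x rest ih =>
      simp only [List.foldl_cons]
      have hins : PySem.List.insertBy b x acc = PySem.List.insertBy b' x acc := by
        clear ih
        induction acc with
        | nil => rfl
        | cons y ys ihy =>
            have hy : b x y = b' x y := h x (by simp) y (by simp)
            rw [pv_insertBy_cons, pv_insertBy_cons, hy,
              ihy (fun z hz w hw => h z hz w (by
                rcases hw with hw | hw
                · exact Or.inl (by simp [hw])
                · exact Or.inr hw))]
      rw [hins]
      apply ih
      intro z hz w hw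
      rcases hw with hw | hw
      · rw [PySem.List.mem_insertBy] at hw
        rcases hw with rfl | hw
        · exact h z (by simp [hz]) w (Or.inr (by simp))
        · exact h z (by simp [hz]) w (Or.inl hw)
      · exact h z (by simp [hz]) w (Or.inr (by simp [hw]))

-- A's composite-key stable sort equals B's bucket pass, on a list of stripped parts
theorem pv_lists_eq (parts : List String) (hstripped : ∀ t ∈ parts, PySem.Str.strip t = t) :
    PySem.List.sorted2 parts pvConstraintKey1 pvConstraintKey2 false
      = (PySem.List.pyRange 0 9 1).foldl
          (fun acc p =>
            acc ++ PySem.List.sorted (parts.filter (fun t => pvPriorityB t == p)) (fun t => t) false)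
          [] := by
  have hA : PySem.List.sorted2 parts pvConstraintKey1 pvConstraintKey2 false
      = parts.foldl (fun acc x =>
          PySem.List.insertBy (fun a b => decide (pvConstraintKey1 a < pvConstraintKey1 b) ||
            (!decide (pvConstraintKey1 b < pvConstraintKey1 a) &&
              decide (pvConstraintKey2 a < pvConstraintKey2 b))) x acc) [] := rfl
  rw [hA]
  rw [pv_foldl_insertBy_congr _ (pvBA pvPriorityB) parts []
      (by
        intro x hx y hy
        rcases hy with hy | hy
        · simp at hy
        · have hxs := hstripped x hx
          have hys := hstripped y hy
          simp only [pvBA, pvConstraintKey2, pv_key_eq x hxs, pv_key_eq y hys, hxs, hys])]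
  rw [pv_bucket_main pvPriorityB pv_priority_bounds parts]
  have hrange : PySem.List.pyRange 0 9 1 = ([0,1,2,3,4,5,6,7,8] : List Int) := by decide
  rw [hrange, PySem.List.foldl_append_eq_flatMap
    (fun p => PySem.List.sorted (parts.filter (fun t => pvPriorityB t == p)) (fun t => t) false)]
  rw [List.nil_append]

-- ===== VERDICT (by name: the statement is the Claim_ definition above) =====
theorem canonicalize_version_spec_py_spec : Claim_equal_canonicalize_version_spec_py := by
  intro version_spec _
  unfold Spec_canonicalize_version_spec_py
  unfold canonicalize_version_spec_py canonicalize_version_spec_py_alt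
  by_cases hin : PySem.Str.isIn "," version_spec
  · simp only [hin, Bool.not_true, Bool.false_eq_true, if_false]
    exact congrArg (PySem.Str.join ",")
      (pv_lists_eq _ (fun t ht => by
        rcases List.mem_filter.mp ht with ⟨hmem, _⟩
        rcases List.mem_map.mp hmem with ⟨q, _, rfl⟩
        exact pv_strip_idem q))
  · rw [Bool.not_eq_true] at hin
    simp only [hin, Bool.not_false, if_true]
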